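-- pv_equiv track=rewrite | github.com/shinemusicllc/Spotify_Anylatics_Web_App | backend/app/api/items.py | _merge_export_blocks
-- ===== SOURCE A (Python) =====
-- def _safe_export_text(value) -> str:
--     if value is None:
--         return ""
--     return str(value).replace("\r", " ").replace("\n", " ").strip()
--
-- def _merge_export_blocks(blocks: list[list[list[str]]]) -> list[list[str]]:
--     normalized_blocks = [block for block in blocks if block]
--     if not normalized_blocks:
--         return []
--
--     widths = [
--         max((len(row) for row in block), default=0)
--         for block in normalized_blocks
--     ]
--     height = max((len(block) for block in normalized_blocks), default=0)
--     merged_rows: list[list[str]] = []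
--
--     for row_index in range(height):
--         merged_row: list[str] = []
--         for block_index, block in enumerate(normalized_blocks):
--             width = widths[block_index]
--             raw_row = block[row_index] if row_index < len(block) else []
--             padded_row = [
--                 _safe_export_text(raw_row[column_index]) if column_index < len(raw_row) else ""
--                 for column_index in range(width)
--             ]
--             merged_row.extend(padded_row)
--             if block_index < len(normalized_blocks) - 1:
--                 merged_row.append("")
--         merged_rows.append(merged_row)
--
--     return merged_rows
-- ===== SOURCE B (Python) =====
-- def _safe_export_text(value) -> str:
--     if value is None:
--         return ""
--     return str(value).replace("\r", " ").replace("\n", " ").strip()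
--
--
-- def _block_rectangle(block, width, height):
--     """Normalize one block to a full width x height rectangle of cleaned cells."""
--     rect = []
--     for row_index in range(height):
--         raw_row = block[row_index] if row_index < len(block) else []
--         rect.append([
--             _safe_export_text(raw_row[ci]) if ci < len(raw_row) else ""
--             for ci in range(width)
--         ])
--     return rect
--
--
-- def _stitch(rows):
--     """Concatenate rows side by side with a single empty separator cell between them."""
--     if not rows:
--         return []
--     out = list(rows[0])
--     for r in rows[1:]:
--         out.append("")
--         out.extend(r)
--     return out
--
--
-- def _merge_export_blocks(blocks: list[list[list[str]]]) -> list[list[str]]: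
--     surviving = [block for block in blocks if block]
--     if not surviving:
--         return []
--     height = max(len(block) for block in surviving)
--     rectangles = [
--         _block_rectangle(block, max((len(row) for row in block), default=0), height)
--         for block in surviving
--     ]
--     return [
--         _stitch([rect[row_index] for rect in rectangles])
--         for row_index in range(height)
--     ]
-- ===== Notes on version B (the rewrite author's own statement) =====
-- stated objective: alternative
-- what changed: B first normalizes each surviving block into a stored full-size rectangle of cleaned/padded cells, then stitches the rectangles row by row with a separator column, instead of A's single row-major nested loop that pads and cleans each block's row inline with an indexed widths lookup.
import Mathlib
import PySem

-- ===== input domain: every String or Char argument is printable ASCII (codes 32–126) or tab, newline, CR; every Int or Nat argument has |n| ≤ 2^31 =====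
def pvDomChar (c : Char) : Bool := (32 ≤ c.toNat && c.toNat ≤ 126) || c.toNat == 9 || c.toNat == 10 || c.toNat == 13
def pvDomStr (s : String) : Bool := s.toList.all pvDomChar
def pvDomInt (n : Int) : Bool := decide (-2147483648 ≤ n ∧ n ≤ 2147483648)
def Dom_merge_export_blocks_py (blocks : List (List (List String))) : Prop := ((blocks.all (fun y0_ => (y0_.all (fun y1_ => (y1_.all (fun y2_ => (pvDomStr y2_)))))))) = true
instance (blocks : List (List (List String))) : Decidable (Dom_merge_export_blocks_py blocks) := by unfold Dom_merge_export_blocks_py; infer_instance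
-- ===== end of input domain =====

-- B normalizes each surviving block into a stored full rectangle of cleaned cells and then
-- stitches the rectangles row by row, instead of A's single nested row-major loop (objective: alternative).

-- ===== PORT A =====
-- _safe_export_text on a str argument (value is never None for a str): replace, replace, strip
def safeText (s : String) : String :=
  PySem.Str.strip (PySem.Str.replace (PySem.Str.replace s "\r" " ") "\n" " ")

-- the inner `for block_index, block in enumerate(normalized_blocks)` loop of A, as recursion
-- over the remaining blocks with the running index `bi` and accumulator `acc`
def aLoop (ws : List Nat) (n ri : Nat) : Nat → List (List (List String)) → List String → List String
  | _, [], acc => acc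
  | bi, block :: rest, acc =>
      let width := ws.getD bi 0
      let raw := if ri < block.length then block.getD ri [] else []
      let padded := (List.range width).map (fun ci => if ci < raw.length then safeText (raw.getD ci "") else "")
      let acc1 := acc ++ padded
      let acc2 := if bi < n - 1 then acc1 ++ [""] else acc1
      aLoop ws n ri (bi + 1) rest acc2

def merge_export_blocks_py (blocks : List (List (List String))) : List (List String) :=
  let nb := blocks.filter (fun b => !b.isEmpty)
  if nb.isEmpty then []
  else
    let widths := nb.map (fun block => (block.map (fun r => r.length)).foldl max 0)
    let height := (nb.map (fun b => b.length)).foldl max 0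
    (List.range height).map (fun ri => aLoop widths nb.length ri 0 nb [])

-- ===== PORT B =====
def widthOf (block : List (List String)) : Nat := (block.map (fun r => r.length)).foldl max 0

-- one normalized row of a block's rectangle
def rectRow (block : List (List String)) (width ri : Nat) : List String :=
  let raw := if ri < block.length then block.getD ri [] else []
  (List.range width).map (fun ci => if ci < raw.length then safeText (raw.getD ci "") else "")

-- _block_rectangle: the full width × height rectangle of cleaned/padded cells
def blockRect (block : List (List String)) (width height : Nat) : List (List String) :=
  (List.range height).map (fun ri => rectRow block width ri)

-- _stitch: first row, then separator + row for each remaining one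
def stitch : List (List String) → List String
  | [] => []
  | r :: rest => rest.foldl (fun acc r2 => (acc ++ [""]) ++ r2) r

def merge_export_blocks_py_alt (blocks : List (List (List String))) : List (List String) :=
  let nb := blocks.filter (fun b => !b.isEmpty)
  if nb.isEmpty then []
  else
    let height := (nb.map (fun b => b.length)).foldl max 0
    let rects := nb.map (fun block => blockRect block (widthOf block) height)
    (List.range height).map (fun ri => stitch (rects.map (fun rect => rect.getD ri [])))

-- ===== PRECONDITION & SPEC =====
def Spec_merge_export_blocks_py (blocks : List (List (List String))) (out : List (List String)) : Prop := out = merge_export_blocks_py_alt blocks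
instance (blocks : List (List (List String))) (out : List (List String)) : Decidable (Spec_merge_export_blocks_py blocks out) := by unfold Spec_merge_export_blocks_py; infer_instance

-- ===== CLAIM (what is proved, stated in full; the proofs are below) =====
def Claim_equal_merge_export_blocks_py : Prop := ∀ (blocks : List (List (List String))), Dom_merge_export_blocks_py blocks → Spec_merge_export_blocks_py blocks (merge_export_blocks_py blocks)

-- ===== LEMMAS AND PROOFS =====

theorem foldl_sep_shift (p : List String) (l : List (List String)) :
    ∀ r, l.foldl (fun acc r2 => (acc ++ [""]) ++ r2) (p ++ r)
      = p ++ l.foldl (fun acc r2 => (acc ++ [""]) ++ r2) r := by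
  induction l with
  | nil => intro r; rfl
  | cons a l ih =>
      intro r
      simp only [List.foldl_cons]
      have h : ((p ++ r) ++ [""]) ++ a = p ++ ((r ++ [""]) ++ a) := by
        simp [List.append_assoc]
      rw [h]
      exact ih _

theorem stitch_cons2 (x y : List String) (l : List (List String)) :
    stitch (x :: y :: l) = (x ++ [""]) ++ stitch (y :: l) := by
  show (y :: l).foldl _ x = (x ++ [""]) ++ l.foldl _ y
  simp only [List.foldl_cons]
  exact foldl_sep_shift (x ++ [""]) l y

theorem aLoop_eq (ws : List Nat) (n ri : Nat) :
    ∀ (rest : List (List (List String))) (bi : Nat) (acc : List String),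
      bi + rest.length = n →
      ws.drop bi = rest.map widthOf →
      aLoop ws n ri bi rest acc
        = acc ++ stitch (rest.map (fun b => rectRow b (widthOf b) ri)) := by
  intro rest
  induction rest with
  | nil => intro bi acc _ _; simp [aLoop, stitch]
  | cons block rest ih =>
      intro bi acc hn hws
      have hget : ws.getD bi 0 = widthOf block := by
        have h1 : (ws.drop bi)[0]? = some (widthOf block) := by rw [hws]; rfl
        rw [List.getElem?_drop, Nat.add_zero] at h1
        simp [List.getD, h1]
      have hdrop : ws.drop (bi + 1) = rest.map widthOf := by
        have h2 : ws.drop (bi + 1) = (ws.drop bi).drop 1 := by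
          rw [List.drop_drop]
        rw [h2, hws]
        simp
      have step : aLoop ws n ri bi (block :: rest) acc
          = aLoop ws n ri (bi + 1) rest
              (if bi < n - 1 then (acc ++ rectRow block (widthOf block) ri) ++ [""]
               else acc ++ rectRow block (widthOf block) ri) := by
        simp only [aLoop, hget, rectRow]
      rw [step]
      cases rest with
      | nil =>
          have hlast : ¬ bi < n - 1 := by simp at hn; omega
          rw [if_neg hlast]
          simp [aLoop, stitch]
      | cons b2 rest' =>
          have hmid : bi < n - 1 := by simp at hn; omega
          rw [if_pos hmid]
          rw [ih (bi + 1) _ (by simp at hn ⊢; omega) hdrop]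
          simp only [List.map_cons]
          rw [stitch_cons2]
          simp [List.append_assoc]

theorem merge_row_eq (nb : List (List (List String))) (height ri : Nat) (hri : ri < height) :
    aLoop (nb.map widthOf) nb.length ri 0 nb []
      = stitch ((nb.map (fun block => blockRect block (widthOf block) height)).map
          (fun rect => rect.getD ri [])) := by
  rw [aLoop_eq (nb.map widthOf) nb.length ri nb 0 [] (by simp) (by simp)]
  rw [List.map_map]
  simp only [List.nil_append]
  congr 1
  apply List.map_congr_left
  intro b _
  simp [Function.comp, blockRect, List.getD_eq_getElem?_getD, hri]

-- ===== VERDICT (by name: the statement is the Claim_ definition above) =====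
theorem merge_export_blocks_py_spec : Claim_equal_merge_export_blocks_py := by
  intro blocks _
  show merge_export_blocks_py blocks = merge_export_blocks_py_alt blocks
  unfold merge_export_blocks_py merge_export_blocks_py_alt
  set nb := blocks.filter (fun b => !b.isEmpty) with hnb
  by_cases h : nb.isEmpty
  · simp [h]
  · simp only [h, if_neg, Bool.false_eq_true, not_false_iff]
    apply List.map_congr_left
    intro ri hri
    rw [List.mem_range] at hri
    exact merge_row_eq nb _ ri hri
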